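-- pv_equiv track=rewrite | github.com/thanushiga/cesar-cipher-decrypt | partie2.py | guess_txt
-- ===== SOURCE A (Python) =====
-- def guess_txt(encrypted_txt, decrypt_key_partial):
--     decrypted_txt = '' #On initialise une chaîne de caractère vide pour stocker le text déchiffré
--     count = 0 #On initialise un compteur pour suivre le nombre de caractères déchiffrés
--     for byte in encrypted_txt: #On parcourt chaque caractère du texte
--         if byte in decrypt_key_partial: #On vérifie si le caractère est présent dans la clé de déchiffrement partielle
--             decrypted_txt += decrypt_key_partial[byte] #Si le caractère est présent, on utilise la clé pour déchiffré le caractère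
--             count += 1 #On incrémente le compteur de caractères déchiffrés
--             #On vérifie si 17 caractères ont été déchiffré et on arrête la boucle si c'est le cas
--             if count == 17:
--                 break
--         else:
--             #Si le caractère n'est pas déchiffré on remplace par $
--             decrypted_txt += '$'
--     return decrypted_txt
-- ===== SOURCE B (Python) =====
-- def guess_txt(encrypted_txt, decrypt_key_partial):
--     # Pass 1: find the cutoff -- one past the 17th character that the partial key maps.
--     mapped = 0
--     cutoff = len(encrypted_txt)
--     for i, ch in enumerate(encrypted_txt):
--         if ch in decrypt_key_partial:
--             mapped += 1
--             if mapped == 17: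
--                 cutoff = i + 1
--                 break
--     # Pass 2: map everything up to the cutoff, '$' for unmapped characters.
--     return ''.join(decrypt_key_partial.get(ch, '$') for ch in encrypted_txt[:cutoff])
-- ===== Notes on version B (the rewrite author's own statement) =====
-- stated objective: alternative
-- what changed: A's single loop that accumulates output and counts to 17 with a break is split into two passes: one pass computes the cutoff index (one past the 17th key-mapped character, defaulting to the string length), then the output is a join of key-lookups with '$' default over the prefix before the cutoff.
import Mathlib
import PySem

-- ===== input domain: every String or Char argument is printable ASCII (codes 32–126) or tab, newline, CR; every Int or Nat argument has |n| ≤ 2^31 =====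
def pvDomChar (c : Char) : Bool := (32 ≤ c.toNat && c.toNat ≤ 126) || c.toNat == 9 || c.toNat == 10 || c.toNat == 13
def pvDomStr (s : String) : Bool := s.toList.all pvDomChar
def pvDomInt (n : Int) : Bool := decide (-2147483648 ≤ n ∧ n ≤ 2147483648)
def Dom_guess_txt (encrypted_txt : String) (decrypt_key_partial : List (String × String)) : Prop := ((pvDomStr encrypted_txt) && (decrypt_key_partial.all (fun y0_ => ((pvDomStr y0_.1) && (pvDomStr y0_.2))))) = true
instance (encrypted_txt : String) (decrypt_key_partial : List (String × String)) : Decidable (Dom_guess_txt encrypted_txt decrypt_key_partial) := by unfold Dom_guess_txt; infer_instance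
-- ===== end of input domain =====

-- B splits A's single accumulate-and-break loop into two passes: first compute the cutoff
-- index (one past the 17th key-mapped character, defaulting to the full length), then map
-- every character before the cutoff through the key with '$' as default (objective: alternative).


-- ===== PORT A =====
-- the for-loop of A: state = (decrypted so far is the prefix already emitted, count);
-- emitted text is built by structural recursion, count is Python's int counter
def pvGoA (key : PySem.Dict String String) : List Char → Int → List Char
  | [], _ => []
  | c :: rest, count =>
    match key.get? (String.ofList [c]) with
    | some v =>
        if count + 1 = 17 then v.toList              -- count += 1; if count == 17: break
        else v.toList ++ pvGoA key rest (count + 1)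
    | none => '$' :: pvGoA key rest count

def guess_txt (encrypted_txt : String) (decrypt_key_partial : List (String × String)) : String :=
  String.ofList (pvGoA (PySem.Dict.mk decrypt_key_partial) encrypted_txt.toList 0)

-- ===== PORT B =====
-- pass 1 of B: enumerate with index i, return i+1 at the 17th mapped char, else the length
def pvCutB (key : PySem.Dict String String) : List Char → Int → Nat → Nat
  | [], _, i => i
  | c :: rest, mapped, i =>
    if key.contains (String.ofList [c]) then
      if mapped + 1 = 17 then i + 1
      else pvCutB key rest (mapped + 1) (i + 1)
    else pvCutB key rest mapped (i + 1)

def guess_txt_alt (encrypted_txt : String) (decrypt_key_partial : List (String × String)) : String :=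
  let key := PySem.Dict.mk decrypt_key_partial
  let cs := encrypted_txt.toList
  let cutoff := pvCutB key cs 0 0
  String.ofList ((cs.take cutoff).flatMap (fun c => (key.getD (String.ofList [c]) "$").toList))

-- ===== PRECONDITION & SPEC =====
def Spec_guess_txt (encrypted_txt : String) (decrypt_key_partial : List (String × String)) (out : String) : Prop := out = guess_txt_alt encrypted_txt decrypt_key_partial
instance (encrypted_txt : String) (decrypt_key_partial : List (String × String)) (out : String) : Decidable (Spec_guess_txt encrypted_txt decrypt_key_partial out) := by unfold Spec_guess_txt; infer_instance

-- ===== CLAIM (what is proved, stated in full; the proofs are below) =====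
def Claim_equal_guess_txt : Prop := ∀ (encrypted_txt : String) (decrypt_key_partial : List (String × String)), Dom_guess_txt encrypted_txt decrypt_key_partial → Spec_guess_txt encrypted_txt decrypt_key_partial (guess_txt encrypted_txt decrypt_key_partial)

-- ===== LEMMAS AND PROOFS =====

theorem pv_contains_eq_isSome (d : PySem.Dict String String) (k : String) :
    d.contains k = (d.get? k).isSome := by
  obtain ⟨items⟩ := d
  induction items with
  | nil => rfl
  | cons p rest ih =>
    by_cases h : p.1 == k
    · simp [PySem.Dict.contains, PySem.Dict.get?, h]
    · simp only [PySem.Dict.contains, PySem.Dict.get?] at *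
      simp [h, ih]

theorem pv_getD_get? (d : PySem.Dict String String) (k dflt : String) :
    d.getD k dflt = (d.get? k).getD dflt := rfl

-- The cutoff loop with an index accumulator advances it by a value independent of the start index.
theorem pvCutB_shift (key : PySem.Dict String String) (cs : List Char) :
    ∀ (m : Int) (i : Nat), pvCutB key cs m i = i + pvCutB key cs m 0 := by
  induction cs with
  | nil => intro m i; rfl
  | cons c rest ih =>
    intro m i
    by_cases hmem : key.contains (String.ofList [c]) = true
    · by_cases h17 : m + 1 = 17
      · simp [pvCutB, hmem, h17]
      · simp only [pvCutB, hmem, if_true, if_neg h17]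
        rw [ih (m + 1) (i + 1), ih (m + 1) 1]
        omega
    · simp only [pvCutB, hmem, Bool.false_eq_true, if_false]
      rw [ih m (i + 1), ih m 1]
      omega

-- Key invariant: while fewer than 17 characters have been mapped, A's remaining loop equals
-- B's map of the prefix of length pvCutB.
theorem pvGoA_eq_cut (key : PySem.Dict String String) (cs : List Char) :
    ∀ (m : Nat), m < 17 →
      pvGoA key cs (m : Int)
        = (cs.take (pvCutB key cs (m : Int) 0)).flatMap
            (fun c => (key.getD (String.ofList [c]) "$").toList) := by
  induction cs with
  | nil => intro m _; simp [pvGoA, pvCutB]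
  | cons c rest ih =>
    intro m hm
    cases hg : key.get? (String.ofList [c]) with
    | some v =>
      have hc : key.contains (String.ofList [c]) = true := by
        rw [pv_contains_eq_isSome, hg]; rfl
      have hget : key.getD (String.ofList [c]) "$" = v := by rw [pv_getD_get?, hg]; rfl
      simp only [pvGoA, pvCutB, hg, hc, if_true]
      by_cases h17 : ((m : Int) + 1 = 17)
      · rw [if_pos h17, if_pos h17]
        simp [hget]
      · rw [if_neg h17, if_neg h17]
        have hm' : m + 1 < 17 := by omega
        have hcast : (m : Int) + 1 = ((m + 1 : Nat) : Int) := by push_cast; ring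
        rw [hcast, ih (m + 1) hm', pvCutB_shift key rest ((m + 1 : Nat) : Int) 1,
          Nat.add_comm 1 (pvCutB key rest ((m + 1 : Nat) : Int) 0), List.take_succ_cons,
          List.flatMap_cons, hget]
    | none =>
      have hc : key.contains (String.ofList [c]) = false := by
        rw [pv_contains_eq_isSome, hg]; rfl
      have hget : key.getD (String.ofList [c]) "$" = "$" := by rw [pv_getD_get?, hg]; rfl
      simp only [pvGoA, pvCutB, hg, hc, Bool.false_eq_true, if_false]
      rw [ih m hm, pvCutB_shift key rest (m : Int) 1,
        Nat.add_comm 1 (pvCutB key rest (m : Int) 0), List.take_succ_cons,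
        List.flatMap_cons, hget]
      rfl

-- ===== VERDICT (by name: the statement is the Claim_ definition above) =====
theorem guess_txt_spec : Claim_equal_guess_txt := by
  intro encrypted_txt decrypt_key_partial _
  unfold Spec_guess_txt guess_txt guess_txt_alt
  exact congrArg String.ofList
    (pvGoA_eq_cut (PySem.Dict.mk decrypt_key_partial) encrypted_txt.toList 0 (by omega))
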